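-- pv_equiv track=rewrite | github.com/Minerstove/Python | cs11/Prac6/6g.py | flower_heights
-- ===== SOURCE A (Python) =====
-- def flower_heights(flowers, ranges):
--     n = len(flowers)
--     diff = [0] * (n + 1)
--
--     l_flowers = list(flowers)
--
--     for i, j in ranges:
--         diff[i - 1] += 2
--         diff[j] -= 2
--
--     running = 0
--     for k in range(n):
--         running += diff[k]
--         l_flowers[k] += running
--
--     return l_flowers
-- ===== SOURCE B (Python) =====
-- def flower_heights(flowers, ranges):
--     # Each (i, j) waters the run of flowers from slot i-1 up to (but not
--     # including) slot j: add 2 to the whole tail from the start slot, then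
--     # take 2 back off the tail from the end slot.  One spare slot past the
--     # last flower absorbs tails that begin past the end; it is dropped at
--     # the end.
--     padded = list(flowers) + [0]
--     for i, j in ranges:
--         padded[i - 1:] = [h + 2 for h in padded[i - 1:]]
--         padded[j:] = [h - 2 for h in padded[j:]]
--     return padded[:-1]
-- ===== Notes on version B (the rewrite author's own statement) =====
-- stated objective: simpler
-- what changed: Replaces A's difference-array + running-prefix-sum two-pass scheme by direct tail updates: on a copy of flowers padded with one spare slot, each range adds 2 to the tail from its start slot via slice assignment and subtracts 2 from the tail from its end slot, and the spare slot is dropped at the end.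
import Mathlib
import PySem

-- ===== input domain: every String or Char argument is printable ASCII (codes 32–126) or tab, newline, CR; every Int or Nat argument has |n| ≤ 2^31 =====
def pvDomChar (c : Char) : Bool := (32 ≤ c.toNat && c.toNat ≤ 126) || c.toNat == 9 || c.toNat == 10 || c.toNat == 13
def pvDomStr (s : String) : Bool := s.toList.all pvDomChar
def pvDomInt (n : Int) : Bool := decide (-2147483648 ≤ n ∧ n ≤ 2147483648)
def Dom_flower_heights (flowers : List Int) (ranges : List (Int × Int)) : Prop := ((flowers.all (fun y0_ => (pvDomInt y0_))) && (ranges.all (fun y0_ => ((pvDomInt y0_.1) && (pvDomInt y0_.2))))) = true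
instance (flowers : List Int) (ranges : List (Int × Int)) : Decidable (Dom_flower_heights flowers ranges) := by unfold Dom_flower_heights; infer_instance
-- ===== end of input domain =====

-- B replaces A's difference-array + running-prefix-sum two passes by direct tail
-- updates through slice assignment on a padded copy (objective: alternative; not faster).

-- ===== PORT A =====
-- diff[i-1] += 2 ; diff[j] -= 2  (Python indexing, negative index from the end; on an
-- out-of-range index Python raises IndexError — such inputs are excluded by Pre_,
-- here pySetD leaves d unchanged)
def fhStep (d : List Int) (ij : Int × Int) : List Int :=
  let d1 := PySem.List.pySetD d (ij.1 - 1) (PySem.List.pyGetD d (ij.1 - 1) 0 + 2)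
  PySem.List.pySetD d1 ij.2 (PySem.List.pyGetD d1 ij.2 0 - 2)

def flower_heights (flowers : List Int) (ranges : List (Int × Int)) : List Int :=
  let n := flowers.length
  let diff := ranges.foldl fhStep (List.replicate (n + 1) (0 : Int))
  let res := (List.range n).foldl
    (fun (st : Int × List Int) (k : Nat) =>
      let running := st.1 + PySem.List.pyGetD diff (k : Int) 0
      (running, PySem.List.pySetD st.2 (k : Int) (PySem.List.pyGetD st.2 (k : Int) 0 + running)))
    ((0 : Int), flowers)
  res.2

-- ===== PORT B =====
-- The slice assignment 'padded[a:] = [h ± 2 for h in padded[a:]]' is ported by hand as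
-- keep-prefix ++ new-suffix; the split point PySem.List.clampIdx and the read
-- PySem.List.slice are exactly Python's slice normalisation, so this is exact.
def fhAltStep (padded : List Int) (ij : Int × Int) : List Int :=
  let p1 := padded.take (PySem.List.clampIdx padded.length (ij.1 - 1)) ++
    (PySem.List.slice padded (some (ij.1 - 1)) none).map (· + 2)
  p1.take (PySem.List.clampIdx p1.length ij.2) ++
    (PySem.List.slice p1 (some ij.2) none).map (· - 2)

def flower_heights_alt (flowers : List Int) (ranges : List (Int × Int)) : List Int :=
  let padded := flowers ++ [0]
  let final := ranges.foldl fhAltStep padded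
  PySem.List.slice final none (some (-1))

-- ===== PRECONDITION & SPEC =====
-- Exactly the inputs on which A returns normally: every range's two diff-array
-- indices i-1 and j are valid Python indices into the (n+1)-element diff array
-- (otherwise A raises IndexError).
def Pre_flower_heights (flowers : List Int) (ranges : List (Int × Int)) : Prop :=
  ∀ p ∈ ranges, -(flowers.length : Int) ≤ p.1 ∧ p.1 ≤ (flowers.length : Int) + 1 ∧
    -((flowers.length : Int) + 1) ≤ p.2 ∧ p.2 ≤ (flowers.length : Int)
instance (flowers : List Int) (ranges : List (Int × Int)) : Decidable (Pre_flower_heights flowers ranges) := by unfold Pre_flower_heights; infer_instance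

def pvWitness_flower_heights : List Int × (List (Int × Int)) := ([1, 2, 3], [(1, 2), (2, 3)])

def Spec_flower_heights (flowers : List Int) (ranges : List (Int × Int)) (out : List Int) : Prop := out = flower_heights_alt flowers ranges
instance (flowers : List Int) (ranges : List (Int × Int)) (out : List Int) : Decidable (Spec_flower_heights flowers ranges out) := by unfold Spec_flower_heights; infer_instance

-- ===== CLAIM (what is proved, stated in full; the proofs are below) =====
def Claim_equal_flower_heights : Prop := ∀ (flowers : List Int) (ranges : List (Int × Int)), Dom_flower_heights flowers ranges → Pre_flower_heights flowers ranges → Spec_flower_heights flowers ranges (flower_heights flowers ranges)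

-- ===== LEMMAS AND PROOFS =====

-- Python's normalisation of an in-range index x into a list of length N
def pvIdx (N x : Int) : Int := if 0 ≤ x then x else x + N

-- per-range contribution at position k, with normalised slots (N = n + 1)
def pvG (N : Int) (k : Nat) (ij : Int × Int) : Int :=
  (if pvIdx N (ij.1 - 1) ≤ (k : Int) then (1 : Int) else 0)
  - (if pvIdx N ij.2 ≤ (k : Int) then (1 : Int) else 0)

-- prefix sum of the diff array
def pvP (d : List Int) (m : Nat) : Int := ∑ t ∈ Finset.range m, d.getD t 0

theorem pySetD_pvIdx (d : List Int) (x v : Int)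
    (h0 : -(d.length : Int) ≤ x) (h1 : x < (d.length : Int)) :
    PySem.List.pySetD d x v = d.set (pvIdx d.length x).toNat v := by
  unfold PySem.List.pySetD PySem.List.pySet? PySem.List.pyIdx? pvIdx
  by_cases h : 0 ≤ x
  · simp [h, h1]
  · simp [h, h0]
    congr 1
    omega

theorem pyGetD_pvIdx (d : List Int) (x dft : Int)
    (h0 : -(d.length : Int) ≤ x) (h1 : x < (d.length : Int)) :
    PySem.List.pyGetD d x dft = d.getD (pvIdx d.length x).toNat dft := by
  unfold PySem.List.pyGetD PySem.List.pyGet? PySem.List.pyIdx? pvIdx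
  by_cases h : 0 ≤ x
  · simp [h, h1, List.getD_eq_getElem?_getD]
  · simp [h, h0, List.getD_eq_getElem?_getD]
    congr 2
    omega

theorem pvP_set (d : List Int) (x : Nat) (v : Int) (hx : x < d.length) (m : Nat) :
    pvP (d.set x (d.getD x 0 + v)) m = pvP d m + (if x < m then v else 0) := by
  unfold pvP
  have hpt : ∀ t, (d.set x (d.getD x 0 + v)).getD t 0 = d.getD t 0 + (if t = x then v else 0) := by
    intro t
    by_cases h : t = x
    · subst h
      simp [List.getD_eq_getElem?_getD, hx]
    · simp [List.getD_eq_getElem?_getD, Ne.symm h, h]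
  rw [Finset.sum_congr rfl (fun t _ => hpt t), Finset.sum_add_distrib,
    Finset.sum_ite_eq' (Finset.range m) x (fun _ => v)]
  simp [Finset.mem_range]

theorem length_fhStep (d : List Int) (p : Int × Int) : (fhStep d p).length = d.length := by
  unfold fhStep
  simp [PySem.List.length_pySetD]

theorem fhStep_pvP (d : List Int) (p : Int × Int) (k : Nat)
    (h : -(d.length : Int) + 1 ≤ p.1 ∧ p.1 ≤ (d.length : Int) ∧
      -(d.length : Int) ≤ p.2 ∧ p.2 < (d.length : Int)) :
    pvP (fhStep d p) (k + 1) = pvP d (k + 1) + 2 * pvG (d.length) k p := by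
  obtain ⟨h1, h2, h3, h4⟩ := h
  have hb1a : -(d.length : Int) ≤ p.1 - 1 := by omega
  have hb1b : p.1 - 1 < (d.length : Int) := by omega
  have hx1n : 0 ≤ pvIdx d.length (p.1 - 1) ∧ pvIdx d.length (p.1 - 1) < (d.length : Int) := by
    unfold pvIdx; split_ifs <;> omega
  have hx2n : 0 ≤ pvIdx d.length p.2 ∧ pvIdx d.length p.2 < (d.length : Int) := by
    unfold pvIdx; split_ifs <;> omega
  have hx1 : (pvIdx d.length (p.1 - 1)).toNat < d.length := by omega
  have hx2 : (pvIdx d.length p.2).toNat < d.length := by omega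
  have e1 : PySem.List.pySetD d (p.1 - 1) (PySem.List.pyGetD d (p.1 - 1) 0 + 2)
      = d.set (pvIdx d.length (p.1 - 1)).toNat (d.getD (pvIdx d.length (p.1 - 1)).toNat 0 + 2) := by
    rw [pySetD_pvIdx d _ _ hb1a hb1b, pyGetD_pvIdx d _ 0 hb1a hb1b]
  unfold fhStep
  simp only [e1]
  set D := d.set (pvIdx d.length (p.1 - 1)).toNat (d.getD (pvIdx d.length (p.1 - 1)).toNat 0 + 2) with hD
  have hlenD : D.length = d.length := by rw [hD]; simp
  have hx2nD : 0 ≤ pvIdx D.length p.2 ∧ pvIdx D.length p.2 < (D.length : Int) := by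
    unfold pvIdx; split_ifs <;> omega
  have e2 : PySem.List.pySetD D p.2 (PySem.List.pyGetD D p.2 0 - 2)
      = D.set (pvIdx D.length p.2).toNat (D.getD (pvIdx D.length p.2).toNat 0 + (-2)) := by
    rw [pySetD_pvIdx D _ _ (by omega) (by omega), pyGetD_pvIdx D _ 0 (by omega) (by omega)]
    ring_nf
  rw [e2, pvP_set D (pvIdx D.length p.2).toNat (-2) (by omega) (k + 1), hD,
    pvP_set d (pvIdx d.length (p.1 - 1)).toNat 2 hx1 (k + 1), hlenD]
  unfold pvG
  split_ifs <;> omega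

theorem length_foldl_fhStep (rs : List (Int × Int)) (d : List Int) :
    (rs.foldl fhStep d).length = d.length := by
  induction rs generalizing d with
  | nil => rfl
  | cons p rest ih => simp [List.foldl_cons, ih, length_fhStep]

theorem foldl_fhStep_pvP (rs : List (Int × Int)) (d : List Int) (k : Nat) (N : Int)
    (hN : N = (d.length : Int))
    (h : ∀ p ∈ rs, -(d.length : Int) + 1 ≤ p.1 ∧ p.1 ≤ (d.length : Int) ∧
      -(d.length : Int) ≤ p.2 ∧ p.2 < (d.length : Int)) :
    pvP (rs.foldl fhStep d) (k + 1) = pvP d (k + 1) + 2 * (rs.map (pvG N k)).sum := by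
  induction rs generalizing d with
  | nil => simp
  | cons p rest ih =>
    have hlen := length_fhStep d p
    rw [List.foldl_cons,
      ih _ (by rw [hN, hlen]) (fun q hq => by rw [hlen]; exact h q (List.mem_cons_of_mem p hq)),
      fhStep_pvP d p k (h p List.mem_cons_self), hN]
    simp [List.map_cons, List.sum_cons]
    ring

-- second loop of A: running-sum invariant
theorem secondLoop (diff flowers : List Int) (m : Nat) (hm : m ≤ flowers.length)
    (_hd : diff.length = flowers.length + 1) :
    (List.range m).foldl
      (fun (st : Int × List Int) (k : Nat) =>
        let running := st.1 + PySem.List.pyGetD diff (k : Int) 0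
        (running, PySem.List.pySetD st.2 (k : Int) (PySem.List.pyGetD st.2 (k : Int) 0 + running)))
      ((0 : Int), flowers)
    = (pvP diff m, flowers.mapIdx (fun k f => if k < m then f + pvP diff (k + 1) else f)) := by
  induction m with
  | zero =>
    simp [pvP]
    apply List.ext_getElem (by simp)
    intro t h1 h2
    simp [List.getElem_mapIdx]
  | succ m ih =>
    have hm' : m ≤ flowers.length := Nat.le_of_succ_le hm
    rw [List.range_succ, List.foldl_append, ih hm']
    simp only [List.foldl_cons, List.foldl_nil]
    have hrun : pvP diff m + PySem.List.pyGetD diff (m : Int) 0 = pvP diff (m + 1) := by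
      rw [PySem.List.pyGetD_natCast]
      unfold pvP
      rw [Finset.sum_range_succ]
    set L := flowers.mapIdx (fun k f => if k < m then f + pvP diff (k + 1) else f) with hL
    have hLlen : L.length = flowers.length := by rw [hL]; simp
    have hmL : m < L.length := by omega
    have hgd : L.getD m 0 = flowers[m]'(by omega) := by
      rw [List.getD_eq_getElem L 0 hmL]
      simp only [hL]
      rw [List.getElem_mapIdx]
      simp
    rw [Prod.mk.injEq]
    constructor
    · exact hrun
    · rw [PySem.List.pySetD_natCast, PySem.List.pyGetD_natCast, hgd, hrun]
      apply List.ext_getElem (by simp [hLlen])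
      intro t h1 h2
      rw [List.getElem_set]
      rcases Nat.lt_trichotomy t m with hlt | heq | hgt
      · rw [if_neg (by omega)]
        simp only [hL, List.getElem_mapIdx]
        rw [if_pos hlt, if_pos (by omega)]
      · subst heq
        rw [if_pos rfl]
        simp only [List.getElem_mapIdx]
        rw [if_pos (by omega)]
      · rw [if_neg (by omega)]
        simp only [hL, List.getElem_mapIdx]
        rw [if_neg (by omega), if_neg (by omega)]

theorem pvP_replicate (n m : Nat) : pvP (List.replicate n (0 : Int)) m = 0 := by
  unfold pvP
  apply Finset.sum_eq_zero
  intro t _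
  simp [List.getD_eq_getElem?_getD, List.getElem?_replicate]
  split <;> simp

-- B side: one tail update as a mapIdx
theorem tailUpd_eq (xs : List Int) (a : Int) (f : Int → Int)
    (h0 : -(xs.length : Int) ≤ a) (h1 : a < (xs.length : Int)) :
    xs.take (PySem.List.clampIdx xs.length a) ++ (PySem.List.slice xs (some a) none).map f
      = xs.mapIdx (fun t h => if pvIdx xs.length a ≤ (t : Int) then f h else h) := by
  have hc : (PySem.List.clampIdx xs.length a : Int) = pvIdx xs.length a := by
    simp [PySem.List.clampIdx, pvIdx]
    split_ifs <;> omega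
  have hcle : PySem.List.clampIdx xs.length a ≤ xs.length := PySem.List.clampIdx_le xs.length a
  rw [PySem.List.slice_some_none]
  apply List.ext_getElem
  · simp only [List.length_append, List.length_take, List.length_drop, List.length_map,
      List.length_mapIdx]
    omega
  · intro t ht1 ht2
    rw [List.getElem_mapIdx]
    by_cases h : t < PySem.List.clampIdx xs.length a
    · rw [List.getElem_append_left (by simp only [List.length_take]; omega), List.getElem_take,
        if_neg (by omega)]
    · rw [List.getElem_append_right (by simp only [List.length_take]; omega), if_pos (by omega)]
      simp only [List.length_take, List.getElem_map, List.getElem_drop]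
      congr 2
      omega

theorem fhAltStep_eq (xs : List Int) (p : Int × Int)
    (h : -(xs.length : Int) ≤ p.1 - 1 ∧ p.1 - 1 < (xs.length : Int) ∧
      -(xs.length : Int) ≤ p.2 ∧ p.2 < (xs.length : Int)) :
    fhAltStep xs p = xs.mapIdx (fun t h => h + 2 * pvG (xs.length) t p) := by
  obtain ⟨h1, h2, h3, h4⟩ := h
  unfold fhAltStep
  rw [tailUpd_eq xs (p.1 - 1) (· + 2) h1 h2]
  set m1 := xs.mapIdx (fun t h => if pvIdx xs.length (p.1 - 1) ≤ (t : Int) then h + 2 else h) with hm1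
  have hl1 : m1.length = xs.length := by rw [hm1]; simp
  rw [tailUpd_eq m1 p.2 (· - 2) (by omega) (by omega), hl1]
  apply List.ext_getElem (by simp [hm1])
  intro t ht1 ht2
  rw [List.getElem_mapIdx, List.getElem_mapIdx]
  simp only [List.getElem_mapIdx]
  unfold pvG
  split_ifs <;> ring

theorem foldl_fhAltStep (rs : List (Int × Int)) (xs : List Int)
    (h : ∀ p ∈ rs, -(xs.length : Int) ≤ p.1 - 1 ∧ p.1 - 1 < (xs.length : Int) ∧
      -(xs.length : Int) ≤ p.2 ∧ p.2 < (xs.length : Int)) :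
    rs.foldl fhAltStep xs = xs.mapIdx (fun k h => h + 2 * (rs.map (pvG (xs.length) k)).sum) := by
  induction rs generalizing xs with
  | nil =>
    apply List.ext_getElem (by simp)
    intro t h1 h2
    simp [List.getElem_mapIdx]
  | cons p rest ih =>
    rw [List.foldl_cons, fhAltStep_eq xs p (h p List.mem_cons_self)]
    set m1 := xs.mapIdx (fun t h => h + 2 * pvG (xs.length) t p) with hm1
    have hl1 : m1.length = xs.length := by rw [hm1]; simp
    rw [ih m1 (fun q hq => by rw [hl1]; exact h q (List.mem_cons_of_mem p hq)), hl1]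
    apply List.ext_getElem (by simp [hm1])
    intro t ht1 ht2
    rw [List.getElem_mapIdx, List.getElem_mapIdx]
    simp only [List.getElem_mapIdx, List.map_cons, List.sum_cons]
    ring

-- ===== VERDICT (by name: the statement is the Claim_ definition above) =====
theorem flower_heights_spec : Claim_equal_flower_heights := by
  unfold Claim_equal_flower_heights
  intro flowers ranges _ hpre
  unfold Spec_flower_heights flower_heights flower_heights_alt
  simp only []
  set diff := ranges.foldl fhStep (List.replicate (flowers.length + 1) (0 : Int)) with hdiff
  have hdlen : diff.length = flowers.length + 1 := by rw [hdiff, length_foldl_fhStep]; simp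
  rw [secondLoop diff flowers flowers.length le_rfl hdlen]
  have hplen : (flowers ++ [0]).length = flowers.length + 1 := by simp
  rw [foldl_fhAltStep ranges (flowers ++ [0]) (by
      intro p hp
      have hb := hpre p hp
      rw [hplen]
      push_cast
      push_cast at hb
      omega)]
  rw [PySem.List.slice_to_neg_one]
  apply List.ext_getElem (by simp)
  intro k h1 h2
  have hkn : k < flowers.length := by simpa using h1
  have hpv : pvP diff (k + 1) = 2 * (ranges.map (pvG (((flowers ++ [0]).length : Nat) : Int) k)).sum := by
    rw [hdiff, foldl_fhStep_pvP _ _ _ (((flowers ++ [0]).length : Nat) : Int)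
        (by simp), pvP_replicate]
    · ring
    · intro p hp
      have hb := hpre p hp
      simp only [List.length_replicate]
      push_cast
      push_cast at hb
      omega
  rw [List.getElem_mapIdx, List.getElem_dropLast, List.getElem_mapIdx,
    List.getElem_append_left hkn, if_pos hkn, hpv]
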